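-- pv_equiv track=rewrite | github.com/EvgeniiRomanov/PythonPY100 | Занятие5/Практические_задания/task1/task8.py | first_last
-- ===== SOURCE A (Python) =====
-- def first_last(letter, st):
-- #-------------------------------1 методами строк коротко и ясно-----------------------------
--     # start_index = None
--     # end_index = None
--     #
--     # if st.count(letter) >= 1:
--     #     start_index = st.find(letter)
--     #     end_index = st.rfind(letter)
--     #
--     # return (start_index, end_index)
-- #-----------------------------------2 через список и 1 цикл ---------------------------------------------
--
--     a = [i for i in st]
--     b = []
--     start_index = None
--     end_index = None
--
--     # for j in range(len(a)):
--     #     if a[j] == letter: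
--     #         b.append(j)
--
--     [b.append(j) for j in range(len(a)) if a[j] == letter]
--
--     if len(b) == 0:
--         return start_index, end_index
--     elif len(b) == 1:
--         return b[0], b[0]
--     else:
--         return b[0], b[-1]
-- ===== SOURCE B (Python) =====
-- def first_last(letter, st):
--     start_index = None
--     for i in range(len(st)):
--         if st[i] == letter:
--             start_index = i
--             break
--     end_index = None
--     for i in range(len(st) - 1, -1, -1):
--         if st[i] == letter:
--             end_index = i
--             break
--     return start_index, end_index
-- ===== Notes on version B (the rewrite author's own statement) =====
-- stated objective: simpler
-- what changed: Instead of materialising the character list and the full list of all matching indices and then case-splitting on its length, B does two early-exit scans: forward to the first matching character and backward to the last, never building any list.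
import Mathlib
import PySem

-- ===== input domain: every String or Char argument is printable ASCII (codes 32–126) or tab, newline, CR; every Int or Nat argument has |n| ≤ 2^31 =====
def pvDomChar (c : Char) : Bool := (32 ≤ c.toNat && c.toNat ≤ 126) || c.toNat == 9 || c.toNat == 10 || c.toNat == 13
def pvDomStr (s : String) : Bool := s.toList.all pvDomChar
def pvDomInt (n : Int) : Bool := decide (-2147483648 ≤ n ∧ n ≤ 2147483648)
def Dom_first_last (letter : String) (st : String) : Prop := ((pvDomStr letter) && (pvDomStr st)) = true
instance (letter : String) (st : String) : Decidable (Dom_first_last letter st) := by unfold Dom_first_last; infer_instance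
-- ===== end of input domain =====

-- B replaces A's full list of matching indices by two early-exit scans (forward for the
-- first match, backward for the last), building no intermediate lists: simpler.


-- ===== PORT A =====
-- a = [i for i in st]  (list of one-character strings), b = matching indices from the
-- range comprehension; the b[0]/b[-1] accesses are guarded by len(b) ≠ 0, so the
-- pyGet?-options are always 'some' where they are used.
def first_last (letter : String) (st : String) : Option Int × Option Int :=
  let a : List String := st.toList.map (fun c => String.ofList [c])
  let b : List Nat := (List.range a.length).filter (fun j => a.getD j "" = letter)
  if b.length = 0 then (none, none)
  else if b.length = 1 then
    ((PySem.List.pyGet? b 0).map Int.ofNat, (PySem.List.pyGet? b 0).map Int.ofNat)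
  else
    ((PySem.List.pyGet? b 0).map Int.ofNat, (PySem.List.pyGet? b (-1)).map Int.ofNat)

-- ===== PORT B =====
-- forward loop 'for i in range(len(st)): … break' — first i with st[i] == letter
def pvScanFront (letter : String) : List Char → Nat → Option Int
  | [], _ => none
  | c :: cs, i => if String.ofList [c] = letter then some (Int.ofNat i) else pvScanFront letter cs (i + 1)

-- backward loop 'for i in range(len(st)-1, -1, -1): … break' — scan the reversed
-- characters with a decreasing Int index
def pvScanBack (letter : String) : List Char → Int → Option Int
  | [], _ => none
  | c :: cs, i => if String.ofList [c] = letter then some i else pvScanBack letter cs (i - 1)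

def first_last_alt (letter : String) (st : String) : Option Int × Option Int :=
  (pvScanFront letter st.toList 0,
   pvScanBack letter st.toList.reverse ((st.toList.length : Int) - 1))

-- ===== PRECONDITION & SPEC =====
def Spec_first_last (letter : String) (st : String) (out : Option Int × Option Int) : Prop := out = first_last_alt letter st
instance (letter : String) (st : String) (out : Option Int × Option Int) : Decidable (Spec_first_last letter st out) := by unfold Spec_first_last; infer_instance

-- ===== CLAIM (what is proved, stated in full; the proofs are below) =====
def Claim_equal_first_last : Prop := ∀ (letter : String) (st : String), Dom_first_last letter st → Spec_first_last letter st (first_last letter st)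

-- ===== LEMMAS AND PROOFS =====

-- the list of matching indices, structurally
def pvMatches (letter : String) : List Char → List Nat
  | [] => []
  | c :: cs => (if String.ofList [c] = letter then [0] else []) ++ (pvMatches letter cs).map (· + 1)

theorem pvMatches_eq_filter (letter : String) (l : List Char) :
    (List.range (l.map (fun c => String.ofList [c])).length).filter
      (fun j => (l.map (fun c => String.ofList [c])).getD j "" = letter) = pvMatches letter l := by
  induction l with
  | nil => simp [pvMatches]
  | cons c cs ih =>
    simp at ih
    by_cases hc : String.ofList [c] = letter <;>
      simp [List.range_succ_eq_map, List.filter_map, Function.comp_def, hc, ih, pvMatches,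
        Nat.succ_eq_add_one]

theorem pvMatches_append (letter : String) (xs ys : List Char) :
    pvMatches letter (xs ++ ys) =
      pvMatches letter xs ++ (pvMatches letter ys).map (· + xs.length) := by
  induction xs with
  | nil => simp [pvMatches]
  | cons c cs ih =>
    simp [pvMatches, ih, List.map_map, Function.comp_def]
    intro a _
    omega

theorem pvScanFront_eq (letter : String) (l : List Char) (k : Nat) :
    pvScanFront letter l k = (pvMatches letter l).head?.map (fun j => Int.ofNat (j + k)) := by
  induction l generalizing k with
  | nil => simp [pvScanFront, pvMatches]
  | cons c cs ih =>
    simp only [pvScanFront, pvMatches]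
    split_ifs with h
    · simp
    · simp [ih (k + 1), List.head?_map, Option.map_map, Function.comp_def]
      cases (pvMatches letter cs).head? <;> simp; omega

theorem pvScanBack_eq (letter : String) (l : List Char) :
    pvScanBack letter l.reverse ((l.length : Int) - 1) =
      (pvMatches letter l).getLast?.map Int.ofNat := by
  induction l using List.reverseRecOn with
  | nil => simp [pvScanBack, pvMatches]
  | append_singleton xs c ih =>
    have hrev : (xs ++ [c]).reverse = c :: xs.reverse := by simp
    have hlen : ((xs ++ [c]).length : Int) - 1 = (xs.length : Int) := by simp
    rw [hrev, hlen, pvScanBack, pvMatches_append]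
    split_ifs with h
    · simp [pvMatches, h]
    · have : ((xs.length : Int)) - 1 = ((xs.length : Int) - 1) := rfl
      simp [pvMatches, h, ih]

theorem pvGet0 (b : List Nat) (h : b ≠ []) :
    (PySem.List.pyGet? b 0).map Int.ofNat = b.head?.map Int.ofNat := by
  simp [PySem.List.pyGet?_zero]
  cases b with
  | nil => simp at h
  | cons x xs => simp

-- ===== VERDICT (by name: the statement is the Claim_ definition above) =====
theorem first_last_spec : Claim_equal_first_last := by
  intro letter st _
  unfold Spec_first_last first_last first_last_alt
  simp only [pvMatches_eq_filter]
  rw [pvScanFront_eq, pvScanBack_eq]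
  set m := pvMatches letter st.toList with hm
  split_ifs with h0 h1
  · rw [List.length_eq_zero_iff] at h0
    simp [h0]
  · match m, h1 with
    | [x], _ => simp  -- singleton: head = last
  · have hne : m ≠ [] := by intro h; simp [h] at h0
    rw [PySem.List.pyGet?_neg_one, pvGet0 m hne]
    cases m.head? <;> simp
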